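-- pv_equiv track=rewrite | github.com/choi-seoghwan/Python_Predict_Lotto | predict.py | removeRow16Nums
-- ===== SOURCE A (Python) =====
-- def removeRow16Nums(possible_nums):
--     c1 = {1,2,3,4,5,6,7}
--     c2 = {8,9,10,11,12,13,14}
--     c3 = {15,16,17,18,19,20,21}
--     c4 = {22,23,24,25,26,27,28}
--     c5 = {29,30,31,32,33,34,35}
--     c6 = {36,37,38,39,40,41,42}
--     c7 = {43,44,45}
--
--     pre_num = [i for i in possible_nums \
--     if not (len(set(i).intersection(c1)) == 1 and \
--         len(set(i).intersection(c2)) == 1 and \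
--             len(set(i).intersection(c3)) == 1 and \
--                 len(set(i).intersection(c4)) == 1 and \
--                     len(set(i).intersection(c5)) == 1 and \
--                         len(set(i).intersection(c6)) == 1)]
--
--     pre_num2 = [i for i in pre_num \
--     if not(len(set(i).intersection(c2)) == 1 and \
--         len(set(i).intersection(c3)) == 1 and \
--             len(set(i).intersection(c4)) == 1 and \
--                 len(set(i).intersection(c5)) == 1 and \
--                     len(set(i).intersection(c6)) == 1 and \
--                         len(set(i).intersection(c7)) == 1)]
--     return pre_num2
-- ===== SOURCE B (Python) =====
-- def removeRow16Nums(possible_nums):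
--     # Sort each row's distinct numbers, map them to their 7-number group, and compare the
--     # resulting (sorted) group sequence directly against the two forbidden patterns.
--     PAT_LOW = [0, 1, 2, 3, 4, 5]
--     PAT_HIGH = [1, 2, 3, 4, 5, 6]
--
--     def bucket(n):
--         if 1 <= n <= 42:
--             return (n - 1) // 7
--         if 43 <= n <= 45:
--             return 6
--         return None
--
--     out = []
--     for row in possible_nums:
--         bs = [b for b in map(bucket, sorted(set(row))) if b is not None]
--         if [b for b in bs if b <= 5] != PAT_LOW and [b for b in bs if b >= 1] != PAT_HIGH:
--             out.append(row)
--     return out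
-- ===== Notes on version B (the rewrite author's own statement) =====
-- stated objective: alternative
-- what changed: Replaces A's two staged filter passes with 12 set intersections per row by sorting each row's distinct numbers, mapping them to their group index, and comparing the resulting sorted group sequence directly against the two forbidden literal patterns [0..5] and [1..6].
import Mathlib
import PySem

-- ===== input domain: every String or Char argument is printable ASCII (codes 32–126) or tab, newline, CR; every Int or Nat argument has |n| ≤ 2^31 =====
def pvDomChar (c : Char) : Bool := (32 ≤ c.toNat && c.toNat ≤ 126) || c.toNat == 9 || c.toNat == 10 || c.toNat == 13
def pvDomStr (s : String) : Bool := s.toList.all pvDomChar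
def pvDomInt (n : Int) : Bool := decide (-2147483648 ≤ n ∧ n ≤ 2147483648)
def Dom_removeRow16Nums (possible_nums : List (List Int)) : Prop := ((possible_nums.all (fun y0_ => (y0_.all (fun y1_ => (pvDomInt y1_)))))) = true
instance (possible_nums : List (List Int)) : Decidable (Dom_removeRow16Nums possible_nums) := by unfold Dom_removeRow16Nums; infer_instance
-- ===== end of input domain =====

-- B replaces A's two staged intersection-counting filter passes by sorting each row's distinct
-- numbers, mapping them to group indices, and comparing the sorted group sequence directly
-- against the two forbidden literal patterns; objective: alternative algorithm, same cost class.

-- ===== PORT A =====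
def pvC1 : PySem.Set Int := [1,2,3,4,5,6,7]
def pvC2 : PySem.Set Int := [8,9,10,11,12,13,14]
def pvC3 : PySem.Set Int := [15,16,17,18,19,20,21]
def pvC4 : PySem.Set Int := [22,23,24,25,26,27,28]
def pvC5 : PySem.Set Int := [29,30,31,32,33,34,35]
def pvC6 : PySem.Set Int := [36,37,38,39,40,41,42]
def pvC7 : PySem.Set Int := [43,44,45]

def pvKeepA1 (i : List Int) : Bool :=
  !(PySem.Set.len (PySem.Set.inter (PySem.Set.ofList i) pvC1) == 1 &&
    PySem.Set.len (PySem.Set.inter (PySem.Set.ofList i) pvC2) == 1 &&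
    PySem.Set.len (PySem.Set.inter (PySem.Set.ofList i) pvC3) == 1 &&
    PySem.Set.len (PySem.Set.inter (PySem.Set.ofList i) pvC4) == 1 &&
    PySem.Set.len (PySem.Set.inter (PySem.Set.ofList i) pvC5) == 1 &&
    PySem.Set.len (PySem.Set.inter (PySem.Set.ofList i) pvC6) == 1)

def pvKeepA2 (i : List Int) : Bool :=
  !(PySem.Set.len (PySem.Set.inter (PySem.Set.ofList i) pvC2) == 1 &&
    PySem.Set.len (PySem.Set.inter (PySem.Set.ofList i) pvC3) == 1 &&
    PySem.Set.len (PySem.Set.inter (PySem.Set.ofList i) pvC4) == 1 &&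
    PySem.Set.len (PySem.Set.inter (PySem.Set.ofList i) pvC5) == 1 &&
    PySem.Set.len (PySem.Set.inter (PySem.Set.ofList i) pvC6) == 1 &&
    PySem.Set.len (PySem.Set.inter (PySem.Set.ofList i) pvC7) == 1)

def removeRow16Nums (possible_nums : List (List Int)) : List (List Int) :=
  (possible_nums.filter pvKeepA1).filter pvKeepA2

-- ===== PORT B =====
def pvPatLow : List Int := [0, 1, 2, 3, 4, 5]
def pvPatHigh : List Int := [1, 2, 3, 4, 5, 6]

def pvBucket (n : Int) : Option Int :=
  if 1 ≤ n ∧ n ≤ 42 then some (PySem.Int.floordiv (n - 1) 7)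
  else if 43 ≤ n ∧ n ≤ 45 then some 6
  else none

-- bs = [b for b in map(bucket, sorted(set(row))) if b is not None]
def pvBuckets (row : List Int) : List Int :=
  (PySem.List.sorted (PySem.Set.ofList row) (fun x => x)).filterMap pvBucket

def pvKeepB (row : List Int) : Bool :=
  !((pvBuckets row).filter (fun b => decide (b ≤ 5)) == pvPatLow) &&
  !((pvBuckets row).filter (fun b => decide (1 ≤ b)) == pvPatHigh)

def removeRow16Nums_alt (possible_nums : List (List Int)) : List (List Int) :=
  possible_nums.filter pvKeepB

-- ===== PRECONDITION & SPEC =====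
def Spec_removeRow16Nums (possible_nums : List (List Int)) (out : List (List Int)) : Prop := out = removeRow16Nums_alt possible_nums
instance (possible_nums : List (List Int)) (out : List (List Int)) : Decidable (Spec_removeRow16Nums possible_nums out) := by unfold Spec_removeRow16Nums; infer_instance

-- ===== CLAIM (what is proved, stated in full; the proofs are below) =====
def Claim_equal_removeRow16Nums : Prop := ∀ (possible_nums : List (List Int)), Dom_removeRow16Nums possible_nums → Spec_removeRow16Nums possible_nums (removeRow16Nums possible_nums)

-- ===== LEMMAS AND PROOFS =====

-- any bucket value is in [0,6]
lemma pvBucket_bounds {n b : Int} (h : pvBucket n = some b) : 0 ≤ b ∧ b ≤ 6 := by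
  unfold pvBucket at h
  by_cases h1 : 1 ≤ n ∧ n ≤ 42
  · rw [if_pos h1] at h
    rcases Option.some_injective _ h with rfl
    have h2 := (PySem.Int.le_floordiv_iff_mul_le (a := n - 1) (b := 7) (q := 0) (by omega)).2 (by omega)
    have h3 := (PySem.Int.floordiv_lt_iff_lt_mul (a := n - 1) (b := 7) (q := 6) (by omega)).2 (by omega)
    omega
  · rw [if_neg h1] at h
    by_cases h2 : 43 ≤ n ∧ n ≤ 45
    · rw [if_pos h2] at h; rcases Option.some_injective _ h with rfl; omega
    · rw [if_neg h2] at h; exact absurd h (by simp)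

-- the bucket map is monotone where defined
lemma pvBucket_mono {n m a b : Int} (hnm : n ≤ m)
    (ha : pvBucket n = some a) (hb : pvBucket m = some b) : a ≤ b := by
  unfold pvBucket at ha hb
  by_cases h1 : 1 ≤ n ∧ n ≤ 42
  · rw [if_pos h1] at ha
    rcases Option.some_injective _ ha with rfl
    by_cases h2 : 1 ≤ m ∧ m ≤ 42
    · rw [if_pos h2] at hb
      rcases Option.some_injective _ hb with rfl
      rcases PySem.Int.floordiv_eq_iff_of_pos (a := n - 1) (b := 7)
        (q := PySem.Int.floordiv (n - 1) 7) (by omega) |>.1 rfl with ⟨hl, hr⟩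
      rw [PySem.Int.le_floordiv_iff_mul_le (by omega : (0:Int) < 7)]
      omega
    · rw [if_neg h2] at hb
      by_cases h3 : 43 ≤ m ∧ m ≤ 45
      · rw [if_pos h3] at hb
        rcases Option.some_injective _ hb with rfl
        have := (PySem.Int.floordiv_lt_iff_lt_mul (a := n - 1) (b := 7) (q := 6) (by omega)).2 (by omega)
        omega
      · rw [if_neg h3] at hb; exact absurd hb (by simp)
  · rw [if_neg h1] at ha
    by_cases h2 : 43 ≤ n ∧ n ≤ 45
    · rw [if_pos h2] at ha
      rcases Option.some_injective _ ha with rfl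
      have hm : ¬ (1 ≤ m ∧ m ≤ 42) := by omega
      rw [if_neg hm] at hb
      have hm3 : 43 ≤ m ∧ m ≤ 45 := by
        by_contra hc; rw [if_neg hc] at hb; exact absurd hb (by simp)
      rw [if_pos hm3] at hb
      rcases Option.some_injective _ hb with rfl
      omega
    · rw [if_neg h2] at ha; exact absurd ha (by simp)

-- the bucket sequence of the sorted distinct row is nondecreasing
lemma pvBuckets_sorted (row : List Int) : (pvBuckets row).Pairwise (· ≤ ·) := by
  unfold pvBuckets
  rw [List.pairwise_filterMap]
  exact (PySem.List.sorted_ofList_pairwise_lt row).imp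
    (fun hlt b hb b' hb' => pvBucket_mono (le_of_lt hlt) hb hb')

lemma pvBuckets_bounds (row : List Int) : ∀ b ∈ pvBuckets row, 0 ≤ b ∧ b ≤ 6 := by
  intro b hb
  rcases List.mem_filterMap.1 hb with ⟨n, _, hn⟩
  exact pvBucket_bounds hn

-- entry counts of the bucket sequence = distinct-element counts per bucket
lemma count_pvBuckets (row : List Int) (k : Int) :
    (pvBuckets row).count k = (PySem.Set.ofList row).countP (fun n => pvBucket n == some k) := by
  unfold pvBuckets
  rw [List.count_filterMap]
  exact (PySem.List.sorted_perm _ _ _).countP_eq _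

-- a nondecreasing sequence over [0,6]: its ≤5-part is [0..5] iff each of 0..5 occurs exactly once
lemma filter_low_eq_iff (bs : List Int) (hs : bs.Pairwise (· ≤ ·))
    (hb : ∀ b ∈ bs, 0 ≤ b ∧ b ≤ 6) :
    bs.filter (fun b => decide (b ≤ 5)) = pvPatLow ↔
      (bs.count 0 = 1 ∧ bs.count 1 = 1 ∧ bs.count 2 = 1 ∧
       bs.count 3 = 1 ∧ bs.count 4 = 1 ∧ bs.count 5 = 1) := by
  have hc : ∀ k : Int, k ≤ 5 → (bs.filter (fun b => decide (b ≤ 5))).count k = bs.count k :=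
    fun k hk => List.count_filter (by simpa using hk)
  constructor
  · intro h
    refine ⟨?_, ?_, ?_, ?_, ?_, ?_⟩ <;> rw [← hc _ (by decide), h] <;> decide
  · rintro ⟨h0, h1, h2, h3, h4, h5⟩
    refine List.Perm.eq_of_pairwise (le := (· ≤ ·))
      (fun a b _ _ hab hba => le_antisymm hab hba)
      (hs.filter _) (by decide) (List.perm_iff_count.2 fun a => ?_)
    by_cases ha5 : a ≤ 5
    · by_cases ha0 : 0 ≤ a
      · interval_cases a <;>
        · rw [hc _ (by decide)]
          simp_all [pvPatLow]
      · have hmem : a ∉ bs := fun hm => absurd ((hb a hm).1) (by omega)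
        rw [List.count_eq_zero.2 (fun hm => hmem (List.mem_of_mem_filter hm)),
            List.count_eq_zero.2 (by simp [pvPatLow]; omega)]
    · have hnf : a ∉ bs.filter (fun b => decide (b ≤ 5)) := fun hm => by
        have := List.of_mem_filter hm; simp at this; omega
      rw [List.count_eq_zero.2 hnf, List.count_eq_zero.2 (by simp [pvPatLow]; omega)]

lemma filter_high_eq_iff (bs : List Int) (hs : bs.Pairwise (· ≤ ·))
    (hb : ∀ b ∈ bs, 0 ≤ b ∧ b ≤ 6) :
    bs.filter (fun b => decide (1 ≤ b)) = pvPatHigh ↔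
      (bs.count 1 = 1 ∧ bs.count 2 = 1 ∧ bs.count 3 = 1 ∧
       bs.count 4 = 1 ∧ bs.count 5 = 1 ∧ bs.count 6 = 1) := by
  have hc : ∀ k : Int, 1 ≤ k → (bs.filter (fun b => decide (1 ≤ b))).count k = bs.count k :=
    fun k hk => List.count_filter (by simpa using hk)
  constructor
  · intro h
    refine ⟨?_, ?_, ?_, ?_, ?_, ?_⟩ <;> rw [← hc _ (by decide), h] <;> decide
  · rintro ⟨h1, h2, h3, h4, h5, h6⟩
    refine List.Perm.eq_of_pairwise (le := (· ≤ ·))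
      (fun a b _ _ hab hba => le_antisymm hab hba)
      (hs.filter _) (by decide) (List.perm_iff_count.2 fun a => ?_)
    by_cases ha1 : 1 ≤ a
    · by_cases ha6 : a ≤ 6
      · interval_cases a <;>
        · rw [hc _ (by decide)]
          simp_all [pvPatHigh]
      · have hmem : a ∉ bs := fun hm => absurd ((hb a hm).2) (by omega)
        rw [List.count_eq_zero.2 (fun hm => hmem (List.mem_of_mem_filter hm)),
            List.count_eq_zero.2 (by simp [pvPatHigh]; omega)]
    · have hnf : a ∉ bs.filter (fun b => decide (1 ≤ b)) := fun hm => by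
        have := List.of_mem_filter hm; simp at this; omega
      rw [List.count_eq_zero.2 hnf, List.count_eq_zero.2 (by simp [pvPatHigh]; omega)]

-- intersection size on the A side is a countP over the deduped row
lemma setlen_inter_eq_countP (ds : List Int) (c : PySem.Set Int) :
    PySem.Set.len (PySem.Set.inter ds c) = ((ds.countP fun x => c.contains x) : Int) := by
  simp only [PySem.Set.len, PySem.Set.inter, List.countP_eq_length_filter]

-- bucket characterisations of the seven constant sets
lemma mem_pvC_iff_bucket (n : Int) :
    (pvC1.contains n = (pvBucket n == some 0)) ∧
    (pvC2.contains n = (pvBucket n == some 1)) ∧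
    (pvC3.contains n = (pvBucket n == some 2)) ∧
    (pvC4.contains n = (pvBucket n == some 3)) ∧
    (pvC5.contains n = (pvBucket n == some 4)) ∧
    (pvC6.contains n = (pvBucket n == some 5)) ∧
    (pvC7.contains n = (pvBucket n == some 6)) := by
  have hdiv : ∀ q : Int, PySem.Int.floordiv (n - 1) 7 = q ↔ q * 7 ≤ n - 1 ∧ n - 1 < (q + 1) * 7 :=
    fun q => PySem.Int.floordiv_eq_iff_of_pos (by omega)
  unfold pvBucket pvC1 pvC2 pvC3 pvC4 pvC5 pvC6 pvC7
  split_ifs with h1 h2 <;>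
  · refine ⟨?_, ?_, ?_, ?_, ?_, ?_, ?_⟩ <;>
    · rw [Bool.eq_iff_iff]
      simp only [PySem.Set.contains_eq_listContains, List.contains_eq_mem, List.mem_cons,
        List.not_mem_nil, or_false, decide_eq_true_eq, Option.some_beq_some,
        Option.none_beq_some, beq_iff_eq, Bool.false_eq_true, iff_false, iff_true,
        beq_self_eq_true, hdiv]
      omega

-- the per-row predicates agree
lemma keep_eq (row : List Int) : (pvKeepA2 row && pvKeepA1 row) = pvKeepB row := by
  have hmem := mem_pvC_iff_bucket
  have hlow := filter_low_eq_iff (pvBuckets row) (pvBuckets_sorted row) (pvBuckets_bounds row)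
  have hhigh := filter_high_eq_iff (pvBuckets row) (pvBuckets_sorted row) (pvBuckets_bounds row)
  unfold pvKeepA1 pvKeepA2 pvKeepB
  simp only [setlen_inter_eq_countP]
  rw [show (fun x => pvC1.contains x) = (fun n => pvBucket n == some 0) from funext fun n => (hmem n).1,
      show (fun x => pvC2.contains x) = (fun n => pvBucket n == some 1) from funext fun n => (hmem n).2.1,
      show (fun x => pvC3.contains x) = (fun n => pvBucket n == some 2) from funext fun n => (hmem n).2.2.1,
      show (fun x => pvC4.contains x) = (fun n => pvBucket n == some 3) from funext fun n => (hmem n).2.2.2.1,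
      show (fun x => pvC5.contains x) = (fun n => pvBucket n == some 4) from funext fun n => (hmem n).2.2.2.2.1,
      show (fun x => pvC6.contains x) = (fun n => pvBucket n == some 5) from funext fun n => (hmem n).2.2.2.2.2.1,
      show (fun x => pvC7.contains x) = (fun n => pvBucket n == some 6) from funext fun n => (hmem n).2.2.2.2.2.2]
  rw [Bool.eq_iff_iff]
  simp only [Bool.and_eq_true, Bool.not_eq_eq_eq_not, Bool.not_true, Bool.and_eq_false_iff,
    beq_eq_false_iff_ne, ne_eq, Nat.cast_eq_one]
  simp only [hlow, hhigh, count_pvBuckets]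
  rw [not_and_or.symm, not_and_or.symm, not_and_or.symm, not_and_or.symm, not_and_or.symm,
      not_and_or.symm, not_and_or.symm, not_and_or.symm, not_and_or.symm, not_and_or.symm]
  simp only [and_assoc]
  exact Iff.intro (fun h => ⟨h.2, h.1⟩) (fun h => ⟨h.2, h.1⟩)

-- ===== VERDICT (by name: the statement is the Claim_ definition above) =====
theorem removeRow16Nums_spec : Claim_equal_removeRow16Nums := by
  intro possible_nums _
  show removeRow16Nums possible_nums = removeRow16Nums_alt possible_nums
  unfold removeRow16Nums removeRow16Nums_alt
  rw [List.filter_filter]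
  exact List.filter_congr fun row _ => keep_eq row
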